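-- pv_equiv track=rewrite | github.com/ajay070993/hotel_search | functions.py | split_guests
-- ===== SOURCE A (Python) =====
-- from typing import List, Dict, Any, Optional, Tuple
--
-- def split_guests(n: int, k: int, m: int) -> List[List[int]]:
--     """Split n guests into k rooms, each room max m, with minimum 1 guest per room."""
--     results = []
--
--     # If we have no guests, return array of zeros
--     if n == 0:
--         return [[0] * k]
--
--     # If we have fewer guests than rooms, we need to allow empty rooms
--     min_per_room = 0 if n < k else 1
--
--     # Calculate base distribution (minimum guests per room)
--     base_per_room = n // k
--     extra_guests = n % k
--
--     # Start with most even distribution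
--     current = [base_per_room] * k
--     for i in range(extra_guests):
--         current[i] += 1
--
--     # If this distribution is valid, add it to results
--     if max(current) <= m and min(current) >= min_per_room:
--         results.append(current)
--
--     # Generate other valid distributions
--     generate_distributions(n, k, m, min_per_room, [], results)
--
--     return results
--
-- def generate_distributions(n: int, k: int, m: int, min_per_room: int,
--                          current: List[int], results: List[List[int]]) -> None:
--     """Helper function to generate all possible guest distributions."""
--     if k == 1:
--         if min_per_room <= n <= m:
--             results.append(current + [n])
--         return
--
--     # Calculate bounds for this room
--     max_for_this_room = min(m, n - (k - 1) * min_per_room)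
--
--     for i in range(min_per_room, max_for_this_room + 1):
--         generate_distributions(
--             n - i,
--             k - 1,
--             m,
--             min_per_room,
--             current + [i],
--             results
--         )
-- ===== SOURCE B (Python) =====
-- def split_guests(n: int, k: int, m: int):
--     """Split n guests into k rooms, each room max m, with minimum 1 guest per room."""
--     results = []
--
--     # If we have no guests, return array of zeros
--     if n == 0:
--         return [[0] * k]
--
--     # If we have fewer guests than rooms, we need to allow empty rooms
--     min_per_room = 0 if n < k else 1
--
--     # Calculate base distribution (minimum guests per room)
--     base_per_room = n // k
--     extra_guests = n % k
--
--     # Start with most even distribution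
--     current = [base_per_room] * k
--     for i in range(extra_guests):
--         current[i] += 1
--
--     # If this distribution is valid, add it to results
--     if max(current) <= m and min(current) >= min_per_room:
--         results.append(current)
--
--     # Generate the other distributions iteratively, level by level:
--     # frontier holds (prefix, remaining guests) pairs in lexicographic order.
--     frontier = [([], n)]
--     rooms_left = k
--     while rooms_left > 1:
--         nxt = []
--         for prefix, rem in frontier:
--             for i in range(min_per_room, min(m, rem - (rooms_left - 1) * min_per_room) + 1):
--                 nxt.append((prefix + [i], rem - i))
--         frontier = nxt
--         rooms_left -= 1
--     for prefix, rem in frontier: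
--         if min_per_room <= rem <= m:
--             results.append(prefix + [rem])
--
--     return results
-- ===== Notes on version B (the rewrite author's own statement) =====
-- stated objective: alternative
-- what changed: The recursive backtracking helper generate_distributions is replaced by an iterative level-by-level expansion of a frontier of (prefix, remaining-guests) states, followed by a single filtering pass for the last room; the preamble (even distribution, division) is kept so the duplicated even distribution and the k=0 ZeroDivisionError are preserved.
import Mathlib
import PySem

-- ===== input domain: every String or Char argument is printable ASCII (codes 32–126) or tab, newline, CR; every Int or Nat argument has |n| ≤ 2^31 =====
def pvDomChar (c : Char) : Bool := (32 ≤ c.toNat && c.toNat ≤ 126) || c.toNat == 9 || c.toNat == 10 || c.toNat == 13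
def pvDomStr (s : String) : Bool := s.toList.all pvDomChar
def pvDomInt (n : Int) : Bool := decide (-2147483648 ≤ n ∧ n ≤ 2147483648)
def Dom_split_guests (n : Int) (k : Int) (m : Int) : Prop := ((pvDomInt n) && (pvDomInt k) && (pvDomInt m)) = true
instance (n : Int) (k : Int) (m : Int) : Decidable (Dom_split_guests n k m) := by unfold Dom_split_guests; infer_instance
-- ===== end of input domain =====

-- B replaces the recursive backtracking helper by an iterative level-by-level (room-by-room)
-- expansion of a frontier of (prefix, remaining) states; same preamble, same output order.

-- ===== PORT A =====
-- Python generate_distributions: recursion on k; fuel = (k-1).toNat suffices for k ≥ 1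
-- (for k ≤ 0 the Python recursion never returns; those inputs are outside Pre_).
def genDist (fuel : Nat) (n : Int) (k : Int) (m : Int) (lo : Int)
    (current : List Int) (results : List (List Int)) : List (List Int) :=
  if k = 1 then
    if lo ≤ n ∧ n ≤ m then results ++ [current ++ [n]] else results
  else
    match fuel with
    | 0 => results
    | f + 1 =>
      (PySem.List.pyRange lo (min m (n - (k - 1) * lo) + 1) 1).foldl
        (fun res i => genDist f (n - i) (k - 1) m lo (current ++ [i]) res) results

def split_guests (n : Int) (k : Int) (m : Int) : List (List Int) :=
  if n = 0 then [List.replicate k.toNat 0]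
  else
    let lo : Int := if n < k then 0 else 1
    if k = 0 then []  -- n // 0 raises ZeroDivisionError; outside Pre_
    else
      let base := PySem.Int.floordiv n k
      let extra := PySem.Int.mod n k
      -- current = [base]*k; for i in range(extra): current[i] += 1  (indices are in range)
      let current := ((PySem.List.pyRange 0 extra 1).foldl
          (fun c i => c.set! i.toNat (c.getD i.toNat 0 + 1)) (Array.replicate k.toNat base)).toList
      match PySem.List.max? current (fun x => x), PySem.List.min? current (fun x => x) with
      | some mx, some mn =>
          let results := if mx ≤ m ∧ mn ≥ lo then [current] else []
          genDist (k - 1).toNat n k m lo [] results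
      | _, _ => []  -- max([]) raises ValueError (k < 0); outside Pre_

-- ===== PORT B =====
-- one pass of the while-loop body: expand every (prefix, rem) state by one more room
def expandLevel (m : Int) (lo : Int) (roomsLeft : Int)
    (frontier : List (List Int × Int)) : List (List Int × Int) :=
  frontier.foldl (fun nxt pr =>
    (PySem.List.pyRange lo (min m (pr.2 - (roomsLeft - 1) * lo) + 1) 1).foldl
      (fun nxt2 i => nxt2 ++ [(pr.1 ++ [i], pr.2 - i)]) nxt) []

-- the while-loop: rooms_left counts down from k to 1; fuel = (k-1).toNat bounds the iterations
def buildFrontier (fuel : Nat) (m : Int) (lo : Int) (roomsLeft : Int)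
    (frontier : List (List Int × Int)) : List (List Int × Int) :=
  match fuel with
  | f + 1 =>
    if 1 < roomsLeft then
      buildFrontier f m lo (roomsLeft - 1) (expandLevel m lo roomsLeft frontier)
    else frontier
  | 0 => frontier  -- unreachable when 1 < roomsLeft: fuel = (roomsLeft-1).toNat

def split_guests_alt (n : Int) (k : Int) (m : Int) : List (List Int) :=
  if n = 0 then [List.replicate k.toNat 0]
  else
    let lo : Int := if n < k then 0 else 1
    if k = 0 then []  -- n // 0 raises ZeroDivisionError; outside Pre_
    else
      let base := PySem.Int.floordiv n k
      let extra := PySem.Int.mod n k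
      let current := ((PySem.List.pyRange 0 extra 1).foldl
          (fun c i => c.set! i.toNat (c.getD i.toNat 0 + 1)) (Array.replicate k.toNat base)).toList
      match PySem.List.max? current (fun x => x) with
      | none => []  -- max([]) raises ValueError (k < 0); outside Pre_
      | some mx =>
        match PySem.List.min? current (fun x => x) with
        | none => []
        | some mn =>
          let results := if mx ≤ m ∧ mn ≥ lo then [current] else []
          let frontier := buildFrontier (k - 1).toNat m lo k [([], n)]
          frontier.foldl
            (fun res pr => if lo ≤ pr.2 ∧ pr.2 ≤ m then res ++ [pr.1 ++ [pr.2]] else res)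
            results

-- ===== PRECONDITION & SPEC =====
-- Pre_ excludes exactly the inputs where Python A does not return: k = 0 with n ≠ 0
-- (ZeroDivisionError), k < 0 with n ≠ 0 (ValueError on max([]) ), and k ≤ 0 reaching the
-- recursion, which never terminates.
def Pre_split_guests (n : Int) (k : Int) (m : Int) : Prop := n = 0 ∨ 1 ≤ k
instance (n : Int) (k : Int) (m : Int) : Decidable (Pre_split_guests n k m) := by
  unfold Pre_split_guests; infer_instance
def pvWitness_split_guests : Int × Int × Int := (5, 2, 4)

def Spec_split_guests (n : Int) (k : Int) (m : Int) (out : List (List Int)) : Prop := out = split_guests_alt n k m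
instance (n : Int) (k : Int) (m : Int) (out : List (List Int)) : Decidable (Spec_split_guests n k m out) := by unfold Spec_split_guests; infer_instance

-- ===== CLAIM (what is proved, stated in full; the proofs are below) =====
def Claim_equal_split_guests : Prop := ∀ (n : Int) (k : Int) (m : Int), Dom_split_guests n k m → Pre_split_guests n k m → Spec_split_guests n k m (split_guests n k m)

-- ===== LEMMAS AND PROOFS =====

-- the final for-loop of B, as a flatMap
def finalP (lo m : Int) (l : List (List Int × Int)) : List (List Int) :=
  l.flatMap (fun pr => if lo ≤ pr.2 ∧ pr.2 ≤ m then [pr.1 ++ [pr.2]] else [])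

theorem finalP_append (lo m : Int) (xs ys : List (List Int × Int)) :
    finalP lo m (xs ++ ys) = finalP lo m xs ++ finalP lo m ys := by
  simp [finalP]

theorem fold_finalP (lo m : Int) (l : List (List Int × Int)) (res : List (List Int)) :
    l.foldl (fun res pr => if lo ≤ pr.2 ∧ pr.2 ≤ m then res ++ [pr.1 ++ [pr.2]] else res) res
      = res ++ finalP lo m l := by
  induction l generalizing res with
  | nil => simp [finalP]
  | cons pr t ih =>
    by_cases h : lo ≤ pr.2 ∧ pr.2 ≤ m <;> simp [finalP, ih, h]

def elFun (m lo roomsLeft : Int) (pr : List Int × Int) : List (List Int × Int) :=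
  (PySem.List.pyRange lo (min m (pr.2 - (roomsLeft - 1) * lo) + 1) 1).map
    (fun i => (pr.1 ++ [i], pr.2 - i))

theorem expandLevel_aux (m lo r : Int) (fr : List (List Int × Int)) (acc : List (List Int × Int)) :
    fr.foldl (fun nxt pr =>
      (PySem.List.pyRange lo (min m (pr.2 - (r - 1) * lo) + 1) 1).foldl
        (fun nxt2 i => nxt2 ++ [(pr.1 ++ [i], pr.2 - i)]) nxt) acc
    = acc ++ fr.flatMap (elFun m lo r) := by
  induction fr generalizing acc with
  | nil => simp
  | cons pr t ih =>
    simp only [List.foldl_cons, List.flatMap_cons]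
    rw [PySem.List.foldl_append_singleton_eq_map, ih, elFun]
    simp

theorem expandLevel_eq (m lo r : Int) (fr : List (List Int × Int)) :
    expandLevel m lo r fr = fr.flatMap (elFun m lo r) := by
  unfold expandLevel
  rw [expandLevel_aux]
  simp

theorem buildFrontier_nil (f : Nat) (m lo : Int) : ∀ (r : Int),
    buildFrontier f m lo r [] = [] := by
  induction f with
  | zero => intro r; rfl
  | succ f ih =>
    intro r
    unfold buildFrontier
    split
    · rw [expandLevel_eq]; simp [ih]
    · rfl

theorem buildFrontier_append (f : Nat) (m lo : Int) :
    ∀ (r : Int) (xs ys : List (List Int × Int)),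
    buildFrontier f m lo r (xs ++ ys) = buildFrontier f m lo r xs ++ buildFrontier f m lo r ys := by
  induction f with
  | zero => intro r xs ys; rfl
  | succ f ih =>
    intro r xs ys
    unfold buildFrontier
    split
    · rw [expandLevel_eq, List.flatMap_append, ← expandLevel_eq, ← expandLevel_eq, ih]
    · rfl

theorem finalP_BF_map (f : Nat) (m lo r lo' m' : Int) (g : Int → List Int × Int)
    (L : List Int) :
    finalP lo' m' (buildFrontier f m lo r (L.map g))
      = L.flatMap (fun x => finalP lo' m' (buildFrontier f m lo r [g x])) := by
  induction L with
  | nil => simp [buildFrontier_nil, finalP]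
  | cons a t ih =>
    have : (a :: t).map g = [g a] ++ t.map g := by simp
    rw [this, buildFrontier_append, finalP_append, ih]
    simp

theorem gen_eq (f : Nat) : ∀ (n k m lo : Int) (cur : List Int) (res : List (List Int)),
    1 ≤ k → f = (k - 1).toNat →
    genDist f n k m lo cur res = res ++ finalP lo m (buildFrontier f m lo k [(cur, n)]) := by
  induction f with
  | zero =>
    intro n k m lo cur res hk hf
    have hk1 : k = 1 := by omega
    subst hk1
    unfold genDist buildFrontier
    by_cases h : lo ≤ n ∧ n ≤ m <;> simp [finalP, h]
  | succ f ih =>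
    intro n k m lo cur res hk hf
    have hk2 : 2 ≤ k := by omega
    have hkne : ¬ (k = 1) := by omega
    have hlt : (1 : Int) < k := by omega
    unfold genDist
    rw [if_neg hkne]
    unfold buildFrontier
    rw [if_pos hlt]
    have hexp : expandLevel m lo k [(cur, n)]
        = (PySem.List.pyRange lo (min m (n - (k - 1) * lo) + 1) 1).map
            (fun i => (cur ++ [i], n - i)) := by
      rw [expandLevel_eq]; simp [elFun]
    have hstep : ∀ (res : List (List Int)) (i : Int),
        genDist f (n - i) (k - 1) m lo (cur ++ [i]) res
          = res ++ finalP lo m (buildFrontier f m lo (k - 1) [(cur ++ [i], n - i)]) := by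
      intro res i
      exact ih (n - i) (k - 1) m lo (cur ++ [i]) res (by omega) (by omega)
    simp only [hstep]
    rw [PySem.List.foldl_append_eq_flatMap, hexp, finalP_BF_map]

theorem main_eq : ∀ (n k m : Int), Pre_split_guests n k m →
    split_guests n k m = split_guests_alt n k m := by
  intro n k m hpre
  by_cases hn : n = 0
  · simp [split_guests, split_guests_alt, hn]
  · have hk : 1 ≤ k := hpre.resolve_left hn
    have hk0 : ¬ (k = 0) := by omega
    simp only [split_guests, split_guests_alt, if_neg hn, if_neg hk0]
    cases PySem.List.max? (((PySem.List.pyRange 0 (PySem.Int.mod n k) 1).foldl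
        (fun c i => c.set! i.toNat (c.getD i.toNat 0 + 1))
        (Array.replicate k.toNat (PySem.Int.floordiv n k))).toList) (fun x => x) with
    | none => rfl
    | some mx =>
      cases PySem.List.min? (((PySem.List.pyRange 0 (PySem.Int.mod n k) 1).foldl
          (fun c i => c.set! i.toNat (c.getD i.toNat 0 + 1))
          (Array.replicate k.toNat (PySem.Int.floordiv n k))).toList) (fun x => x) with
      | none => rfl
      | some mn =>
        simp only []
        rw [fold_finalP, gen_eq (k - 1).toNat n k m _ [] _ hk rfl]

-- ===== VERDICT (by name: the statement is the Claim_ definition above) =====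
theorem split_guests_spec : Claim_equal_split_guests := by
  intro n k m _ hpre
  unfold Spec_split_guests
  exact main_eq n k m hpre
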